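-- pv_equiv track=rewrite | github.com/kmullapudi-11/DLH_FinalProject | data_formatting.py | generate_output_lines_and_labels
-- ===== SOURCE A (Python) =====
-- def generate_output_lines_and_labels(text_lines, ast_dict):
-- 	# Line numbers are 1 indexed with reference to the ast file.
-- 	line_num = 1
--
-- 	output_lines = []
-- 	output_labels = []
-- 	for line in text_lines:
-- 		if line_num not in ast_dict:
-- 			line_num += 1
-- 			continue
-- 		line = line.strip()
-- 		for ast in ast_dict[line_num]:
-- 			start_word = ast["start_word"]
-- 			end_word = ast["end_word"]
-- 			assertion = ast["assertion"]
-- 			words_in_line = line.split(" ")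
-- 			# Insert the tokens "ENT_1_START""  and "ENT_1_END" around the context words
-- 			words_in_line.insert(end_word + 1, "ENT_1_END")
-- 			words_in_line.insert(start_word, "ENT_1_START")
-- 			output_lines.append(" ".join(words_in_line))
-- 			output_labels.append(assertion)
-- 		line_num += 1
--
-- 	if len(output_lines) != len(output_labels):
-- 		raise ValueError("Output lines and labels are not of the save size.")
-- 	return output_lines, output_labels
-- ===== SOURCE B (Python) =====
-- def generate_output_lines_and_labels(text_lines, ast_dict):
-- 	# Annotation-driven traversal: iterate the ast line numbers in sorted order
-- 	# and use text_lines as a lookup table (instead of walking every text line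
-- 	# with a running counter).
-- 	n = len(text_lines)
-- 	output_lines = []
-- 	output_labels = []
-- 	for line_num in sorted(ast_dict):
-- 		if 1 <= line_num <= n:
-- 			words_base = text_lines[line_num - 1].strip().split(" ")
-- 			for ast in ast_dict[line_num]:
-- 				words = list(words_base)
-- 				words.insert(ast["end_word"] + 1, "ENT_1_END")
-- 				words.insert(ast["start_word"], "ENT_1_START")
-- 				output_lines.append(" ".join(words))
-- 				output_labels.append(ast["assertion"])
-- 	return output_lines, output_labels
-- ===== Notes on version B (the rewrite author's own statement) =====
-- stated objective: alternative
-- what changed: B reverses the traversal roles: instead of walking every text line with a running 1-based counter and testing membership in ast_dict, it iterates the ast line numbers in sorted ascending order, guards them to 1..len(text_lines), and uses text_lines as a direct lookup table (splitting each line once), dropping the dead length check.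
-- outside the precondition, e.g. on generate_output_lines_and_labels(['a b'], {1: [{'start_word': 0, 'end_word': 0}]}): A raises KeyError, B raises KeyError
import Mathlib
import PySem

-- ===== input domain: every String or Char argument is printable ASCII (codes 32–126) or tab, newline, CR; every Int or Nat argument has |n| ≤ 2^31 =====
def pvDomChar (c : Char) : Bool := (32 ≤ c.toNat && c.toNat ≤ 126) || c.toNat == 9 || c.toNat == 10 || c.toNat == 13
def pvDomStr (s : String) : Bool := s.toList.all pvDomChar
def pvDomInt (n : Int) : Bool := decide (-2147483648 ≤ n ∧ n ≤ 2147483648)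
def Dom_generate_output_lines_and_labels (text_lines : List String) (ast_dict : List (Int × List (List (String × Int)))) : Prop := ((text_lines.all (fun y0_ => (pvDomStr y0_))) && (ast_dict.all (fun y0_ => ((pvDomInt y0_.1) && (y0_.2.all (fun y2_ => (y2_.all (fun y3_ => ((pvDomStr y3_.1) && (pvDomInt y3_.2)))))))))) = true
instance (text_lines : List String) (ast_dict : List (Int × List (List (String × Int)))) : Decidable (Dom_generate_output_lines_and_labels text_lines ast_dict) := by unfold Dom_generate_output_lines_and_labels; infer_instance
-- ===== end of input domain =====

-- B reverses the traversal: the sorted annotation line numbers drive the loop and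
-- text_lines is an indexed lookup table, instead of A's counter walk over every text line.

-- ===== PORT A =====
-- one marked output line: split the (already stripped) line, insert the two markers, join
def pvMarkA (sline : String) (ast : List (String × Int)) : String :=
  let words := (PySem.Str.split? sline " ").getD []   -- sep " " ≠ "", split? is some
  let w1 := PySem.List.insert words ((PySem.Dict.mk ast).getD "end_word" 0 + 1) "ENT_1_END"
  let w2 := PySem.List.insert w1 ((PySem.Dict.mk ast).getD "start_word" 0) "ENT_1_START"
  PySem.Str.join " " w2

-- A's main loop: walk text_lines with the running counter line_num
def pvLinesA (ast_dict : List (Int × List (List (String × Int)))) :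
    List String → Int → List String × List Int
  | [], _ => ([], [])
  | line :: rest, line_num =>
    match (PySem.Dict.mk ast_dict).get? line_num with
    | none => pvLinesA ast_dict rest (line_num + 1)
    | some asts =>
      let s := PySem.Str.strip line
      let r := pvLinesA ast_dict rest (line_num + 1)
      (asts.map (pvMarkA s) ++ r.1,
       asts.map (fun ast => (PySem.Dict.mk ast).getD "assertion" 0) ++ r.2)

-- A's final 'len != len' ValueError branch is unreachable (one line and one label are
-- appended per ast), so the port returns the pair directly.
def generate_output_lines_and_labels (text_lines : List String) (ast_dict : List (Int × List (List (String × Int)))) : List String × List Int :=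
  pvLinesA ast_dict text_lines 1

-- ===== PORT B =====
-- one marked output line from the precomputed word list of the line
def pvMarkB (words_base : List String) (ast : List (String × Int)) : String :=
  let w1 := PySem.List.insert words_base ((PySem.Dict.mk ast).getD "end_word" 0 + 1) "ENT_1_END"
  let w2 := PySem.List.insert w1 ((PySem.Dict.mk ast).getD "start_word" 0) "ENT_1_START"
  PySem.Str.join " " w2

-- B's main loop: the sorted annotation keys drive; text_lines is a lookup table
def pvKeysB (text_lines : List String) (ast_dict : List (Int × List (List (String × Int)))) :
    List Int → List String × List Int
  | [] => ([], [])
  | line_num :: ks =>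
    let r := pvKeysB text_lines ast_dict ks
    if 1 ≤ line_num ∧ line_num ≤ (text_lines.length : Int) then
      let words_base :=
        (PySem.Str.split? (PySem.Str.strip ((PySem.List.pyGet? text_lines (line_num - 1)).getD "")) " ").getD []
      let asts := ((PySem.Dict.mk ast_dict).get? line_num).getD []
      (asts.map (pvMarkB words_base) ++ r.1,
       asts.map (fun ast => (PySem.Dict.mk ast).getD "assertion" 0) ++ r.2)
    else r

def generate_output_lines_and_labels_alt (text_lines : List String) (ast_dict : List (Int × List (List (String × Int)))) : List String × List Int :=
  pvKeysB text_lines ast_dict (PySem.List.sorted (ast_dict.map Prod.fst) (fun x => x) false)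

-- ===== PRECONDITION & SPEC =====
-- Pre_ excludes association lists with duplicate keys (duplicate line numbers, or duplicate
-- field names inside an in-range ast), which do not correspond to any Python dict input, and
-- in-range asts missing one of the 'start_word'/'end_word'/'assertion' fields, on which A
-- raises KeyError.
def Pre_generate_output_lines_and_labels (text_lines : List String) (ast_dict : List (Int × List (List (String × Int)))) : Prop :=
  (ast_dict.map Prod.fst).Nodup ∧
  ∀ p ∈ ast_dict, 1 ≤ p.1 → p.1 ≤ (text_lines.length : Int) →
    ∀ ast ∈ p.2, (ast.map Prod.fst).Nodup ∧
      "start_word" ∈ ast.map Prod.fst ∧ "end_word" ∈ ast.map Prod.fst ∧ "assertion" ∈ ast.map Prod.fst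
instance (text_lines : List String) (ast_dict : List (Int × List (List (String × Int)))) : Decidable (Pre_generate_output_lines_and_labels text_lines ast_dict) := by unfold Pre_generate_output_lines_and_labels; infer_instance

def pvWitness_generate_output_lines_and_labels : List String × (List (Int × List (List (String × Int)))) :=
  (["Hello brave new world", "second line"],
   [(1, [[("start_word", 1), ("end_word", 2), ("assertion", 0)]]), (5, [])])

def Spec_generate_output_lines_and_labels (text_lines : List String) (ast_dict : List (Int × List (List (String × Int)))) (out : List String × List Int) : Prop := out = generate_output_lines_and_labels_alt text_lines ast_dict
instance (text_lines : List String) (ast_dict : List (Int × List (List (String × Int)))) (out : List String × List Int) : Decidable (Spec_generate_output_lines_and_labels text_lines ast_dict out) := by unfold Spec_generate_output_lines_and_labels; infer_instance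

-- ===== CLAIM (what is proved, stated in full; the proofs are below) =====
def Claim_equal_generate_output_lines_and_labels : Prop := ∀ (text_lines : List String) (ast_dict : List (Int × List (List (String × Int)))), Dom_generate_output_lines_and_labels text_lines ast_dict → Pre_generate_output_lines_and_labels text_lines ast_dict → Spec_generate_output_lines_and_labels text_lines ast_dict (generate_output_lines_and_labels text_lines ast_dict)

-- ===== LEMMAS AND PROOFS =====

-- the output block contributed by one annotated line number k
def pvBlock (text_lines : List String) (ast_dict : List (Int × List (List (String × Int)))) (k : Int) : List String × List Int :=
  let words_base :=
    (PySem.Str.split? (PySem.Str.strip ((PySem.List.pyGet? text_lines (k - 1)).getD "")) " ").getD []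
  let asts := ((PySem.Dict.mk ast_dict).get? k).getD []
  (asts.map (pvMarkB words_base), asts.map (fun ast => (PySem.Dict.mk ast).getD "assertion" 0))

-- concatenation of the blocks of a list of line numbers
def pvCat (text_lines : List String) (ast_dict : List (Int × List (List (String × Int)))) :
    List Int → List String × List Int
  | [] => ([], [])
  | k :: ks =>
    ((pvBlock text_lines ast_dict k).1 ++ (pvCat text_lines ast_dict ks).1,
     (pvBlock text_lines ast_dict k).2 ++ (pvCat text_lines ast_dict ks).2)

-- B is the concatenation of blocks over its in-range keys
theorem pvKeysB_eq_pvCat (tl : List String) (ad : List (Int × List (List (String × Int)))) (ks : List Int) :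
    pvKeysB tl ad ks = pvCat tl ad (ks.filter (fun k => decide (1 ≤ k ∧ k ≤ (tl.length : Int)))) := by
  induction ks with
  | nil => rfl
  | cons k ks ih =>
    by_cases h : 1 ≤ k ∧ k ≤ (tl.length : Int) <;>
      simp [pvKeysB, pvCat, pvBlock, h, ih]

-- A is the concatenation of blocks over the annotated counter values, in counter order
theorem pvLinesA_eq_pvCat (ad : List (Int × List (List (String × Int)))) :
    ∀ (lines pre : List String),
      pvLinesA ad lines ((pre.length : Int) + 1) =
        pvCat (pre ++ lines) ad
          (((List.range' (pre.length + 1) lines.length).map (Nat.cast : Nat → Int)).filter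
            (fun k => ((PySem.Dict.mk ad).get? k).isSome)) := by
  intro lines
  induction lines with
  | nil => intro pre; simp [pvLinesA, pvCat]
  | cons line rest ih =>
    intro pre
    have ih' := ih (pre ++ [line])
    simp only [List.length_append, List.length_cons, List.length_nil, Nat.zero_add,
      List.append_assoc, List.singleton_append] at ih'
    push_cast at ih'
    rw [show (line :: rest).length = rest.length + 1 from rfl, List.range'_succ,
      List.map_cons, List.filter_cons]
    push_cast
    cases hget : (PySem.Dict.mk ad).get? ((pre.length : Int) + 1) with
    | none =>
      simp only [pvLinesA, hget, Option.isSome_none, Bool.false_eq_true, if_false]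
      exact ih'
    | some asts =>
      have hline : (PySem.List.pyGet? (pre ++ line :: rest) ((pre.length : Int) + 1 - 1)).getD "" = line := by
        rw [show (pre.length : Int) + 1 - 1 = ((pre.length : Nat) : Int) by ring,
          PySem.List.pyGet?_append_length, Option.getD_some]
      simp only [pvLinesA, hget, Option.isSome_some, if_true, pvCat, pvBlock, hline,
        Option.getD_some]
      rw [ih']
      rfl

-- a key is found in the dict iff it occurs among the keys
theorem pvIsSome_get?_mk (ad : List (Int × List (List (String × Int)))) (k : Int) :
    ((PySem.Dict.mk ad).get? k).isSome = true ↔ k ∈ ad.map Prod.fst := by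
  have hc : (PySem.Dict.mk ad).contains k = true ↔ k ∈ ad.map Prod.fst := by
    rw [PySem.Dict.contains_iff_mem_keys, PySem.Dict.keys_mk]
  rw [← hc]
  constructor
  · intro h
    cases hcc : (PySem.Dict.mk ad).contains k
    · rw [(PySem.Dict.get?_eq_none_iff_contains _ _).mpr hcc] at h; cases h
    · rfl
  · intro h
    cases hg : (PySem.Dict.mk ad).get? k
    · rw [(PySem.Dict.get?_eq_none_iff_contains _ _).mp hg] at h; cases h
    · rfl

-- the two key traversals enumerate the same line numbers in the same (ascending) order
theorem pvKeys_eq (tl : List String) (ad : List (Int × List (List (String × Int))))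
    (hnd : (ad.map Prod.fst).Nodup) :
    ((List.range' 1 tl.length).map (Nat.cast : Nat → Int)).filter
        (fun k => ((PySem.Dict.mk ad).get? k).isSome) =
      (PySem.List.sorted (ad.map Prod.fst) (fun x => x) false).filter
        (fun k => decide (1 ≤ k ∧ k ≤ (tl.length : Int))) := by
  set n := tl.length with hn
  have hmemL : ∀ k : Int, k ∈ ((List.range' 1 n).map (Nat.cast : Nat → Int)).filter
      (fun k => ((PySem.Dict.mk ad).get? k).isSome) ↔
      (1 ≤ k ∧ k ≤ (n : Int)) ∧ k ∈ ad.map Prod.fst := by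
    intro k
    rw [List.mem_filter, List.mem_map]
    constructor
    · rintro ⟨⟨j, hj, rfl⟩, hs⟩
      rw [List.mem_range'] at hj
      obtain ⟨i, hi, rfl⟩ := hj
      exact ⟨⟨by omega, by omega⟩, (pvIsSome_get?_mk ad _).mp hs⟩
    · rintro ⟨⟨h1, h2⟩, hk⟩
      refine ⟨⟨k.toNat, ?_, by omega⟩, (pvIsSome_get?_mk ad k).mpr hk⟩
      rw [List.mem_range']
      exact ⟨k.toNat - 1, by omega, by omega⟩
  have hmemR : ∀ k : Int, k ∈ (PySem.List.sorted (ad.map Prod.fst) (fun x => x) false).filter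
      (fun k => decide (1 ≤ k ∧ k ≤ (n : Int))) ↔
      (1 ≤ k ∧ k ≤ (n : Int)) ∧ k ∈ ad.map Prod.fst := by
    intro k
    rw [List.mem_filter, PySem.List.mem_sorted]
    simp [and_comm]
  have hndL : (((List.range' 1 n).map (Nat.cast : Nat → Int)).filter
      (fun k => ((PySem.Dict.mk ad).get? k).isSome)).Nodup :=
    (((List.nodup_range' 1).map (fun a b h => by exact_mod_cast h)).filter _)
  have hndR : ((PySem.List.sorted (ad.map Prod.fst) (fun x => x) false).filter
      (fun k => decide (1 ≤ k ∧ k ≤ (n : Int)))).Nodup :=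
    (((PySem.List.sorted_perm (ad.map Prod.fst) (fun x => x) false).nodup_iff).mpr hnd).filter _
  have hperm := (List.perm_ext_iff_of_nodup hndL hndR).mpr
    (fun k => by rw [hmemL k, hmemR k])
  have hsortL : (((List.range' 1 n).map (Nat.cast : Nat → Int)).filter
      (fun k => ((PySem.Dict.mk ad).get? k).isSome)).Pairwise (· ≤ ·) := by
    refine List.Pairwise.sublist List.filter_sublist ?_
    refine (List.pairwise_lt_range' (s := 1) (n := n) 1).map _ ?_ |>.imp le_of_lt
    intro a b h; exact_mod_cast h
  have hsortR : ((PySem.List.sorted (ad.map Prod.fst) (fun x => x) false).filter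
      (fun k => decide (1 ≤ k ∧ k ≤ (n : Int)))).Pairwise (· ≤ ·) :=
    List.Pairwise.sublist List.filter_sublist
      (PySem.List.sorted_pairwise (ad.map Prod.fst) (fun x => x))
  exact List.Perm.eq_of_pairwise (fun a b _ _ h1 h2 => le_antisymm h1 h2) hsortL hsortR hperm

-- ===== VERDICT (by name: the statement is the Claim_ definition above) =====
theorem generate_output_lines_and_labels_spec : Claim_equal_generate_output_lines_and_labels := by
  intro tl ad _hdom hpre
  unfold Spec_generate_output_lines_and_labels
  unfold generate_output_lines_and_labels generate_output_lines_and_labels_alt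
  have hA := pvLinesA_eq_pvCat ad tl []
  simp only [List.length_nil, Nat.cast_zero, Int.zero_add, List.nil_append, Nat.zero_add] at hA
  rw [hA, pvKeysB_eq_pvCat, pvKeys_eq tl ad hpre.1]
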